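-- pv_equiv track=rewrite | github.com/BlacknoSheep/Gomoku | gomuku/score.py | calc_line_score
-- ===== SOURCE A (Python) =====
-- SCORE = [[10, 100, 1000, 10000, 100000],
--          [1, 10, 100, 1000, 100000]]
--
-- def calc_line_score(line):
--     """
--     计算一条直线上的分数
--     :param line: 列表，-1黑子，0空位，1白子
--     :return: 分数，黑子得分负，白子正
--     """
--     line_length = len(line)
--     if line_length < 5:  # 不可能连成5子
--         return 0
--     left_blank = 0
--     right_blank = 0
--     score = 0  # 得分
--     i = 0
--     while i < line_length:  # 从前往后搜索
--         score_x = 0  # 活棋索引0，半活棋索引1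
--         length = 0  # 连子长度
--         if line[i] == 0:  # 全局左侧空位，若line内无棋子则只会运行这一句，score不改变（=0）
--             left_blank += 1
--             i += 1
--             continue
--         else:  # 黑子or白子
--             color = line[i]
--             length += 1
--             while i + 1 < line_length and line[i + 1] == color:  # 连子数
--                 length += 1
--                 i += 1  # 表示该点已扫描
--             while i + 1 < line_length and line[i + 1] == 0:  # 右侧空位数
--                 right_blank += 1
--                 i += 1  # 表示该点已扫描
--         if left_blank + length + right_blank >= 5:  # 只有在可能连成5子时才计算得分
--             if length > 5:
--                 length = 5
--             if left_blank == 0 or right_blank == 0:  # 半活棋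
--                 score_x = 1
--             score_y = length - 1  # 列索引
--             if color == -1:
--                 score -= SCORE[score_x][score_y] * 1  # 增大负值惩罚
--             else:
--                 score += SCORE[score_x][score_y]
--         left_blank = right_blank  # 本连子的右侧空位为下一个连子的左侧空位
--         right_blank = 0  # 右侧空白从0开始重新计数
--         i += 1
--     return score
-- ===== SOURCE B (Python) =====
-- SCORE = [[10, 100, 1000, 10000, 100000],
--          [1, 10, 100, 1000, 100000]]
--
-- def calc_line_score(line):
--     if len(line) < 5:
--         return 0
--     # run-length-encode the line into (value, run_length) segments
--     segs = []
--     for v in line: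
--         if segs and segs[-1][0] == v:
--             segs[-1] = (v, segs[-1][1] + 1)
--         else:
--             segs.append((v, 1))
--     score = 0
--     lb = 0  # length of the blank run to the left of the current segment
--     for k, (v, n) in enumerate(segs):
--         if v == 0:
--             lb = n
--             continue
--         rb = segs[k + 1][1] if k + 1 < len(segs) and segs[k + 1][0] == 0 else 0
--         if lb + n + rb >= 5:
--             m = 5 if n > 5 else n
--             pts = SCORE[1 if lb == 0 or rb == 0 else 0][m - 1]
--             score += -pts if v == -1 else pts
--         lb = 0
--     return score
-- ===== Notes on version B (the rewrite author's own statement) =====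
-- stated objective: simpler
-- what changed: B run-length-encodes the line into (value, run-length) segments and scores each piece segment from its neighbouring blank runs, instead of A's index-based scan with nested while loops and left/right blank counters carried across iterations.
import Mathlib
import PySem

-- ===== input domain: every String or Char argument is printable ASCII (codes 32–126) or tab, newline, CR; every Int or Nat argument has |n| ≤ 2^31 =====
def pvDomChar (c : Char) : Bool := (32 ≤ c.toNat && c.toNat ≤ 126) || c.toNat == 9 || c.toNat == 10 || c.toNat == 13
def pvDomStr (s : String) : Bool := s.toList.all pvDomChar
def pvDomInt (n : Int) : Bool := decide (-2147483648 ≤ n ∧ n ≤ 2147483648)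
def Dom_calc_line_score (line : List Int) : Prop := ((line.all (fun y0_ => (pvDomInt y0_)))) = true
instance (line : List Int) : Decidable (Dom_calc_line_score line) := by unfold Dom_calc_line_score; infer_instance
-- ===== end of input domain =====

-- B re-implements the scan by run-length-encoding the line and scoring each piece segment
-- from its neighbouring blank segments; objective: simpler/alternative decomposition (not faster).

-- ===== PORT A =====

-- SCORE constant of the module
def pvScoreTable : List (List Int) :=
  [[10, 100, 1000, 10000, 100000], [1, 10, 100, 1000, 100000]]

-- inner `while i + 1 < line_length and line[i + 1] == color` loop (advances i, counts length);
-- the structural fuel argument only bounds the iteration count (n is always enough, proved below)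
def pvWhileSame (line : List Int) (n : Nat) (color : Int) :
    Nat → Nat → Int → Nat × Int
  | 0, i, length => (i, length)
  | fuel + 1, i, length =>
    if i + 1 < n ∧ line.getD (i + 1) 0 = color then
      pvWhileSame line n color fuel (i + 1) (length + 1)
    else (i, length)

-- inner `while i + 1 < line_length and line[i + 1] == 0` loop (advances i, counts right_blank)
def pvWhileBlank (line : List Int) (n : Nat) :
    Nat → Nat → Int → Nat × Int
  | 0, i, rb => (i, rb)
  | fuel + 1, i, rb =>
    if i + 1 < n ∧ line.getD (i + 1) 0 = 0 then
      pvWhileBlank line n fuel (i + 1) (rb + 1)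
    else (i, rb)

-- outer `while i < line_length` loop carrying (i, left_blank, right_blank, score);
-- i strictly increases each iteration, so fuel = n covers the whole loop;
-- line.getD i 0 is exact for line[i] since every read has i < n = len(line);
-- PySem.List.pyGetD is exact for SCORE[score_x][score_y] (indices provably in range)
def pvALoop (line : List Int) (n : Nat) :
    Nat → Nat → Int → Int → Int → Int
  | 0, _, _, _, score => score
  | fuel + 1, i, lb, rb, score =>
    if i < n then
      if line.getD i 0 = 0 then
        pvALoop line n fuel (i + 1) (lb + 1) rb score
      else
        let color := line.getD i 0
        let p := pvWhileSame line n color n i 1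
        let q := pvWhileBlank line n n p.1 rb
        let length := p.2
        let rb' := q.2
        let score' :=
          if lb + length + rb' ≥ 5 then
            let len2 := if length > 5 then 5 else length
            let sx : Int := if lb = 0 ∨ rb' = 0 then 1 else 0
            let pts := PySem.List.pyGetD (PySem.List.pyGetD pvScoreTable sx []) (len2 - 1) 0
            if color = -1 then score - pts * 1 else score + pts
          else score
        pvALoop line n fuel (q.1 + 1) rb' 0 score'
    else score

def calc_line_score (line : List Int) : Int :=
  let line_length := line.length
  if line_length < 5 then 0
  else pvALoop line line_length line_length 0 0 0 0

-- ===== PORT B =====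

-- one step of the RLE-building loop; the accumulator is kept most-recent-first
-- (Python appends / updates segs[-1]; we reverse at the end)
def pvRleStep (acc : List (Int × Int)) (v : Int) : List (Int × Int) :=
  match acc with
  | (v0, n0) :: t => if v0 = v then (v0, n0 + 1) :: t else (v, 1) :: (v0, n0) :: t
  | [] => [(v, 1)]

-- the scoring loop over enumerate(segs); segs[k+1] is the tail's head
def pvBLoop (segs : List (Int × Int)) (lb score : Int) : Int :=
  match segs with
  | [] => score
  | (v, n) :: rest =>
    if v = 0 then pvBLoop rest n score
    else
      let rb : Int := match rest with
        | (v2, k) :: _ => if v2 = 0 then k else 0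
        | [] => 0
      let score' :=
        if lb + n + rb ≥ 5 then
          let m := if n > 5 then 5 else n
          let pts := PySem.List.pyGetD
            (PySem.List.pyGetD pvScoreTable (if lb = 0 ∨ rb = 0 then 1 else 0) []) (m - 1) 0
          score + (if v = -1 then -pts else pts)
        else score
      pvBLoop rest 0 score'

def calc_line_score_alt (line : List Int) : Int :=
  if line.length < 5 then 0
  else pvBLoop ((line.foldl pvRleStep []).reverse) 0 0

-- ===== PRECONDITION & SPEC =====
def Spec_calc_line_score (line : List Int) (out : Int) : Prop := out = calc_line_score_alt line
instance (line : List Int) (out : Int) : Decidable (Spec_calc_line_score line out) := by unfold Spec_calc_line_score; infer_instance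

-- ===== CLAIM (what is proved, stated in full; the proofs are below) =====
def Claim_equal_calc_line_score : Prop := ∀ (line : List Int), Dom_calc_line_score line → Spec_calc_line_score line (calc_line_score line)

-- ===== LEMMAS AND PROOFS =====

-- the score contribution of one piece segment (the common formula of both ports)
def pvContrib (v lb n rb : Int) : Int :=
  if lb + n + rb ≥ 5 then
    let m := if n > 5 then 5 else n
    let pts := PySem.List.pyGetD
      (PySem.List.pyGetD pvScoreTable (if lb = 0 ∨ rb = 0 then 1 else 0) []) (m - 1) 0
    if v = -1 then -pts else pts
  else 0

-- canonical recursion both ports are reduced to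
def pvGo : List Int → Int → Int
  | [], _ => 0
  | x :: rest, lb =>
    if x = 0 then pvGo rest (lb + 1)
    else
      let r := (rest.takeWhile (fun y => y == x)).length
      let z := ((rest.drop r).takeWhile (fun y => y == 0)).length
      pvContrib x lb (1 + (r : Int)) z + pvGo (rest.drop (r + z)) z
termination_by l => l.length
decreasing_by
  all_goals try rw [List.length_drop]
  all_goals rw [List.length_cons]
  all_goals omega

-- canonical run-length encoding
def pvRleC : List Int → List (Int × Int)
  | [] => []
  | x :: rest =>
    let r := (rest.takeWhile (fun y => y == x)).length
    (x, 1 + (r : Int)) :: pvRleC (rest.drop r)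
termination_by l => l.length
decreasing_by
  all_goals try rw [List.length_drop]
  all_goals rw [List.length_cons]
  all_goals omega

theorem pvDropCons (line : List Int) (i : Nat) (y : Int) (ys : List Int)
    (h : line.drop i = y :: ys) :
    i < line.length ∧ line.getD i 0 = y ∧ line.drop (i + 1) = ys := by
  refine ⟨?_, ?_, ?_⟩
  · by_contra hc
    rw [List.drop_eq_nil_iff.mpr (by omega)] at h
    exact absurd h (by simp)
  · have h0 : (line.drop i)[0]? = some y := by rw [h]; rfl
    rw [List.getElem?_drop] at h0
    rw [List.getD_eq_getElem?_getD]
    simpa using congrArg (Option.getD · 0) h0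
  · rw [← List.tail_drop, h]; rfl

theorem pvDropWhileEq (p : Int → Bool) (l : List Int) :
    l.dropWhile p = l.drop (l.takeWhile p).length := by
  induction l with
  | nil => simp
  | cons x xs ih => by_cases h : p x <;> simp [List.dropWhile_cons, h, ih]

theorem pvWhileSame_eq (line : List Int) (color : Int) :
    ∀ (d : List Int) (i : Nat), line.drop (i + 1) = d → ∀ (fuel : Nat), d.length ≤ fuel →
      ∀ (length : Int),
      pvWhileSame line line.length color fuel i length =
        (i + (d.takeWhile (fun y => y == color)).length,
         length + ((d.takeWhile (fun y => y == color)).length : Int)) := by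
  intro d
  induction d with
  | nil =>
    intro i h fuel _ length
    have hle : line.length ≤ i + 1 := List.drop_eq_nil_iff.mp h
    cases fuel with
    | zero => simp [pvWhileSame]
    | succ fuel =>
      rw [pvWhileSame, if_neg (by rintro ⟨h1, -⟩; omega)]
      simp
  | cons y ys ih =>
    intro i h fuel hf length
    obtain ⟨h1, h2, h3⟩ := pvDropCons line (i + 1) y ys h
    cases fuel with
    | zero => simp at hf
    | succ fuel =>
      by_cases hy : y = color
      · rw [pvWhileSame, if_pos ⟨h1, by rw [h2, hy]⟩,
            ih (i + 1) h3 fuel (by simpa using hf) (length + 1)]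
        simp only [List.takeWhile_cons, hy, BEq.rfl, if_pos, List.length_cons]
        refine Prod.ext ?_ ?_ <;> simp <;> push_cast <;> ring
      · rw [pvWhileSame, if_neg (by rintro ⟨-, hc⟩; rw [h2] at hc; exact hy hc)]
        simp [List.takeWhile_cons, hy]

theorem pvWhileBlank_eq (line : List Int) :
    ∀ (d : List Int) (i : Nat), line.drop (i + 1) = d → ∀ (fuel : Nat), d.length ≤ fuel →
      ∀ (rb : Int),
      pvWhileBlank line line.length fuel i rb =
        (i + (d.takeWhile (fun y => y == (0 : Int))).length,
         rb + ((d.takeWhile (fun y => y == (0 : Int))).length : Int)) := by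
  intro d
  induction d with
  | nil =>
    intro i h fuel _ rb
    have hle : line.length ≤ i + 1 := List.drop_eq_nil_iff.mp h
    cases fuel with
    | zero => simp [pvWhileBlank]
    | succ fuel =>
      rw [pvWhileBlank, if_neg (by rintro ⟨h1, -⟩; omega)]
      simp
  | cons y ys ih =>
    intro i h fuel hf rb
    obtain ⟨h1, h2, h3⟩ := pvDropCons line (i + 1) y ys h
    cases fuel with
    | zero => simp at hf
    | succ fuel =>
      by_cases hy : y = 0
      · rw [pvWhileBlank, if_pos ⟨h1, by rw [h2, hy]⟩,
            ih (i + 1) h3 fuel (by simpa using hf) (rb + 1)]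
        simp only [List.takeWhile_cons, hy, BEq.rfl, if_pos, List.length_cons]
        refine Prod.ext ?_ ?_ <;> simp <;> push_cast <;> ring
      · rw [pvWhileBlank, if_neg (by rintro ⟨-, hc⟩; rw [h2] at hc; exact hy hc)]
        simp [List.takeWhile_cons, hy]

theorem pvALoop_eq (line : List Int) :
    ∀ (fuel : Nat) (d : List Int), d.length ≤ fuel → ∀ (i : Nat), line.drop i = d →
      ∀ (lb score : Int),
        pvALoop line line.length fuel i lb 0 score = score + pvGo d lb := by
  intro fuel
  induction fuel with
  | zero =>
    intro d hd i hdrop lb score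
    have hnil : d = [] := List.length_eq_zero_iff.mp (by omega)
    subst hnil
    simp [pvALoop, pvGo]
  | succ fuel ih =>
    intro d hd i hdrop lb score
    cases d with
    | nil =>
      have hle : line.length ≤ i := List.drop_eq_nil_iff.mp hdrop
      rw [pvALoop, if_neg (by omega)]
      simp [pvGo]
    | cons x rest =>
      obtain ⟨h1, h2, h3⟩ := pvDropCons line i x rest hdrop
      have hrestlen : rest.length = line.length - (i + 1) := by
        rw [← h3]; exact List.length_drop
      rw [pvALoop, if_pos h1]
      by_cases hx : x = 0
      · rw [if_pos (by rw [h2, hx])]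
        rw [ih rest (by simpa using hd) (i + 1) h3 (lb + 1) score]
        rw [pvGo]
        simp [hx]
      · rw [if_neg (by rw [h2]; exact hx)]
        simp only [h2]
        rw [pvWhileSame_eq line x rest i h3 line.length (by omega) 1]
        set r := (rest.takeWhile (fun y => y == x)).length with hr
        have hrle : r ≤ rest.length := by
          rw [hr]
          have := List.takeWhile_sublist (l := rest) (p := fun y => y == x)
          exact this.length_le
        have hdrop2 : line.drop (i + r + 1) = rest.drop r := by
          rw [show i + r + 1 = (i + 1) + r by omega, ← List.drop_drop, h3]
        have hdr2len : (rest.drop r).length = rest.length - r := List.length_drop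
        rw [pvWhileBlank_eq line (rest.drop r) (i + r) hdrop2 line.length (by omega) 0]
        set z := ((rest.drop r).takeWhile (fun y => y == (0 : Int))).length with hz
        have hdrop3 : line.drop (i + r + z + 1) = rest.drop (r + z) := by
          rw [show i + r + z + 1 = (i + 1) + (r + z) by omega, ← List.drop_drop, h3]
        have hlen : (rest.drop (r + z)).length ≤ fuel := by
          have hld : (rest.drop (r + z)).length = rest.length - (r + z) := List.length_drop
          simp only [List.length_cons] at hd
          omega
        dsimp only
        rw [zero_add]
        rw [ih (rest.drop (r + z)) hlen (i + r + z + 1) hdrop3 z _]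
        rw [pvGo, if_neg hx]
        simp only [← hr, ← hz, pvContrib]
        split_ifs with hge hcol <;> push_cast <;> ring

theorem pvFoldl_rleStep_cons :
    ∀ (xs : List Int) (a : Int × Int) (t : List (Int × Int)),
      List.foldl pvRleStep (a :: t) xs = List.foldl pvRleStep [a] xs ++ t := by
  intro xs
  induction xs with
  | nil => intro a t; simp
  | cons x xs ih =>
    intro a t
    obtain ⟨v0, n0⟩ := a
    simp only [List.foldl_cons]
    by_cases h : v0 = x
    · simp only [pvRleStep, if_pos h]
      exact ih (v0, n0 + 1) t
    · simp only [pvRleStep, if_neg h]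
      rw [ih (x, 1) ((v0, n0) :: t), ih (x, 1) [(v0, n0)]]
      simp

theorem pvFoldl_rleStep_single :
    ∀ (xs : List Int) (x : Int) (n : Int),
      (List.foldl pvRleStep [(x, n)] xs).reverse =
        (x, n + ((xs.takeWhile (fun y => y == x)).length : Int)) ::
          pvRleC (xs.drop (xs.takeWhile (fun y => y == x)).length) := by
  intro xs
  induction xs with
  | nil => intro x n; simp [pvRleC]
  | cons y ys ih =>
    intro x n
    simp only [List.foldl_cons]
    by_cases h : x = y
    · subst h
      rw [show pvRleStep [(x, n)] x = [(x, n + 1)] from by simp [pvRleStep]]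
      rw [ih x (n + 1)]
      rw [show (x :: ys).takeWhile (fun y' => y' == x)
            = x :: ys.takeWhile (fun y' => y' == x) from by simp [List.takeWhile_cons]]
      simp only [List.length_cons, List.drop_succ_cons]
      congr 2
      push_cast
      ring
    · simp only [pvRleStep, if_neg h]
      rw [pvFoldl_rleStep_cons ys (y, 1) [(x, n)]]
      rw [List.reverse_append, ih y 1]
      have ht : ((y :: ys).takeWhile (fun y' => y' == x)).length = 0 := by
        simp [List.takeWhile_cons, Ne.symm h]
      rw [ht]
      simp only [List.drop_zero, List.reverse_cons, List.reverse_nil, List.nil_append,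
        List.singleton_append]
      rw [pvRleC]
      simp

theorem pvRleB_eq (line : List Int) :
    (line.foldl pvRleStep []).reverse = pvRleC line := by
  cases line with
  | nil => simp [pvRleC]
  | cons x xs =>
    have : pvRleStep [] x = [(x, 1)] := rfl
    rw [List.foldl_cons, this, pvFoldl_rleStep_single xs x 1, pvRleC]

-- pvGo consumes a maximal zero prefix by adding its length to the left-blank count
theorem pvGo_zeros :
    ∀ (l : List Int) (lb : Int),
      pvGo l lb = pvGo (l.drop (l.takeWhile (fun y => y == (0 : Int))).length)
        (lb + ((l.takeWhile (fun y => y == (0 : Int))).length : Int)) := by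
  intro l
  induction l with
  | nil => intro lb; simp
  | cons y ys ih =>
    intro lb
    by_cases hy : y = 0
    · subst hy
      rw [pvGo, if_pos rfl, ih (lb + 1)]
      rw [show ((0 : Int) :: ys).takeWhile (fun y' => y' == (0 : Int))
            = 0 :: ys.takeWhile (fun y' => y' == (0 : Int)) from by simp [List.takeWhile_cons]]
      simp only [List.length_cons, List.drop_succ_cons]
      congr 1
      push_cast
      ring
    · have : ((y :: ys).takeWhile (fun y => y == (0 : Int))).length = 0 := by
        simp [List.takeWhile_cons, hy]
      rw [this]
      simp

-- the element after a maximal (== c)-prefix does not satisfy the predicate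
theorem pvHeadD_drop_takeWhile (l : List Int) (c : Int) :
    (l.drop (l.takeWhile (fun y => y == c)).length).headD (c + 1) ≠ c := by
  rw [← pvDropWhileEq]
  have h := List.head?_dropWhile_not (fun y => y == c) l
  rcases hh : (l.dropWhile (fun y => y == c)).head? with _ | y
  · simp [List.headD_eq_head?_getD, hh]
  · rw [hh] at h
    simp [List.headD_eq_head?_getD, hh]
    simpa using h

theorem pvBLoop_eq :
    ∀ (m : Nat) (l : List Int), l.length ≤ m → ∀ (lb score : Int),
      (lb = 0 ∨ l.headD 1 ≠ 0) →
      pvBLoop (pvRleC l) lb score = score + pvGo l lb := by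
  intro m
  induction m with
  | zero =>
    intro l hl lb score _
    have hnil : l = [] := List.length_eq_zero_iff.mp (by omega)
    subst hnil
    simp [pvRleC, pvBLoop, pvGo]
  | succ m ih =>
    intro l hl lb score hlb
    cases l with
    | nil => simp [pvRleC, pvBLoop, pvGo]
    | cons x rest =>
      rw [pvRleC]
      simp only [List.length_cons] at hl
      by_cases hx : x = 0
      · subst hx
        have hlb0 : lb = 0 := by
          rcases hlb with h | h
          · exact h
          · simp at h
        subst hlb0
        simp only [pvBLoop]
        rw [if_pos trivial]
        set t := (rest.takeWhile (fun y => y == (0 : Int))).length with htdef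
        have hhead : (rest.drop t).headD 1 ≠ 0 := by
          have := pvHeadD_drop_takeWhile rest 0
          simpa using this
        have hlen : (rest.drop t).length ≤ m := by
          have : (rest.drop t).length = rest.length - t := List.length_drop
          omega
        rw [ih (rest.drop t) hlen (1 + (t : Int)) score (Or.inr hhead)]
        rw [pvGo, if_pos rfl, zero_add, pvGo_zeros rest 1, ← htdef]
      · simp only [pvBLoop]
        rw [if_neg hx]
        set r := (rest.takeWhile (fun y => y == x)).length with hrdef
        set z := ((rest.drop r).takeWhile (fun y => y == (0 : Int))).length with hzdef
        have hlen : (rest.drop r).length ≤ m := by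
          have : (rest.drop r).length = rest.length - r := List.length_drop
          omega
        -- the peeked right-blank equals z
        have hrb : (match pvRleC (rest.drop r) with
            | (v2, k) :: _ => if v2 = 0 then k else 0
            | [] => (0 : Int)) = (z : Int) := by
          rcases hdr : rest.drop r with _ | ⟨y, ys⟩
          · rw [hdr] at hzdef
            simp [pvRleC, hzdef]
          · rw [pvRleC]
            by_cases hy : y = 0
            · subst hy
              rw [hdr] at hzdef
              rw [show ((0 : Int) :: ys).takeWhile (fun y' => y' == (0 : Int))
                    = 0 :: ys.takeWhile (fun y' => y' == (0 : Int)) from by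
                    simp [List.takeWhile_cons]] at hzdef
              simp only [List.length_cons] at hzdef
              simp only [if_pos rfl, hzdef]
              push_cast
              ring
            · rw [hdr] at hzdef
              rw [show (y :: ys).takeWhile (fun y' => y' == (0 : Int)) = [] from by
                    simp [List.takeWhile_cons, hy]] at hzdef
              simp [hy, hzdef]
        rw [hrb]
        rw [ih (rest.drop r) hlen 0 _ (Or.inl rfl)]
        rw [pvGo, if_neg hx]
        rw [pvGo_zeros (rest.drop r) 0, List.drop_drop, ← hzdef]
        simp only [← hrdef, ← hzdef, pvContrib]
        rw [show r + z = r + z from rfl]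
        split_ifs with hge hcol <;> push_cast <;> ring

-- ===== VERDICT (by name: the statement is the Claim_ definition above) =====
theorem calc_line_score_spec : Claim_equal_calc_line_score := by
  intro line _
  unfold Spec_calc_line_score calc_line_score calc_line_score_alt
  by_cases h : line.length < 5
  · simp [h]
  · simp only [h, if_false]
    rw [pvALoop_eq line line.length line le_rfl 0 (by simp) 0 0,
        pvRleB_eq line, pvBLoop_eq line.length line le_rfl 0 0 (Or.inl rfl)]
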